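-- pv_equiv track=rewrite | github.com/PaulPio/CodePath | Week2Class2.py | count_endangered_species
-- ===== SOURCE A (Python) =====
-- def count_endangered_species(endangered_species, observed_species):
--     endangered_species_set = set(endangered_species)
--     counter = 0
--     endangered_species_set.intersection
--     for species in observed_species:
--         if species in endangered_species_set: #in is to check if the item is on the set
--             counter +=1
--     return counter
-- ===== SOURCE B (Python) =====
-- def count_endangered_species(endangered_species, observed_species):
--     counts = {}
--     for species in observed_species:
--         counts[species] = counts.get(species, 0) + 1
--     total = 0
--     for species in set(endangered_species):
--         total += counts.get(species, 0)
--     return total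
-- ===== Notes on version B (the rewrite author's own statement) =====
-- stated objective: alternative
-- what changed: B reverses the loop direction: instead of scanning observed_species testing membership in a set of endangered ones, it builds a frequency table of observed_species once and sums the counts of the distinct endangered species.
import Mathlib
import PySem

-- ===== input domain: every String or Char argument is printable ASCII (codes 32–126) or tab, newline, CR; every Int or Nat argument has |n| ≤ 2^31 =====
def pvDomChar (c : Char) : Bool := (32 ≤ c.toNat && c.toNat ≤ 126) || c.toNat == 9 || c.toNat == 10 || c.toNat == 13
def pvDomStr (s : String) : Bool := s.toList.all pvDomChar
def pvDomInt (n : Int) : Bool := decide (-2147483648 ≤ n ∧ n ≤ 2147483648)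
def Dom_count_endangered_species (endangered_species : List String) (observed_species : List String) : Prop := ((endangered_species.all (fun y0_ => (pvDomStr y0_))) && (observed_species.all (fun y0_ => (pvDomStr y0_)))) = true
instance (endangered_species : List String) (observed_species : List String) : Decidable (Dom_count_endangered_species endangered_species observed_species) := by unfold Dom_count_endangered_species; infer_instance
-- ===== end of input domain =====

-- B reverses the loop: it counts observed species in a dict, then sums counts over the distinct endangered species.

-- ===== PORT A =====
def count_endangered_species (endangered_species : List String) (observed_species : List String) : Int :=
  let endangered_species_set : PySem.Set String := PySem.Set.ofList endangered_species
  observed_species.foldl (fun counter species =>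
    if species ∈ endangered_species_set then counter + 1 else counter) 0

-- ===== PORT B =====
def count_endangered_species_alt (endangered_species : List String) (observed_species : List String) : Int :=
  let counts : PySem.Dict String Int :=
    observed_species.foldl (fun d species => d.modify species 0 (· + 1)) PySem.Dict.empty
  (PySem.Set.ofList endangered_species).foldl (fun total species => total + counts.getD species 0) 0

-- ===== PRECONDITION & SPEC =====
def Spec_count_endangered_species (endangered_species : List String) (observed_species : List String) (out : Int) : Prop := out = count_endangered_species_alt endangered_species observed_species
instance (endangered_species : List String) (observed_species : List String) (out : Int) : Decidable (Spec_count_endangered_species endangered_species observed_species out) := by unfold Spec_count_endangered_species; infer_instance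

-- ===== CLAIM (what is proved, stated in full; the proofs are below) =====
def Claim_equal_count_endangered_species : Prop := ∀ (endangered_species : List String) (observed_species : List String), Dom_count_endangered_species endangered_species observed_species → Spec_count_endangered_species endangered_species observed_species (count_endangered_species endangered_species observed_species)

-- ===== LEMMAS AND PROOFS =====

-- Sum of the indicator 'if s = x then 1 else 0' over a duplicate-free list is 1 iff x is in it.
lemma sum_indicator_nodup (S : List String) (x : String) (h : S.Nodup) :
    (S.map (fun s => if s = x then (1 : Int) else 0)).sum = if x ∈ S then 1 else 0 := by
  induction S with
  | nil => simp
  | cons a S ih =>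
    simp only [List.nodup_cons] at h
    by_cases hax : a = x
    · subst hax
      have h0 : (S.map (fun s => if s = a then (1 : Int) else 0)).sum = 0 := by
        rw [ih h.2]; simp [h.1]
      simp [h0]
    · have hxa : ¬ x = a := fun hh => hax hh.symm
      simp [hax, ih h.2, hxa]

lemma sum_map_add_split (S : List String) (f g : String → Int) :
    (S.map (fun s => f s + g s)).sum = (S.map f).sum + (S.map g).sum := by
  induction S with
  | nil => simp
  | cons a S ih => simp only [List.map_cons, List.sum_cons, ih]; ring

-- Summing observed counts over a duplicate-free list equals counting observed members of it.
lemma sum_count_eq_countP (S : List String) (h : S.Nodup) (o : List String) :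
    (S.map (fun s => (o.count s : Int))).sum = (o.countP (fun x => decide (x ∈ S)) : Int) := by
  induction o with
  | nil => simp
  | cons x o ih =>
    have hcount : ∀ s, ((x :: o).count s : Int) = (o.count s : Int) + (if s = x then 1 else 0) := by
      intro s
      by_cases hs : s = x
      · subst hs; simp
      · have hx : ¬ x = s := fun hh => hs hh.symm
        simp [hs, hx]
    simp only [hcount]
    rw [sum_map_add_split, ih, sum_indicator_nodup S x h, List.countP_cons]
    by_cases hx : x ∈ S <;> simp [hx]

-- ===== VERDICT (by name: the statement is the Claim_ definition above) =====
theorem count_endangered_species_spec : Claim_equal_count_endangered_species := by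
  intro e o _
  unfold Spec_count_endangered_species count_endangered_species count_endangered_species_alt
  simp only []
  rw [PySem.List.foldl_ite_add_one]
  rw [PySem.List.foldl_add]
  have hgetD : ∀ s : String,
      (o.foldl (fun d species => d.modify species 0 (· + 1)) PySem.Dict.empty).getD s 0
        = (o.count s : Int) := by
    intro s
    rw [PySem.Dict.getD_foldl_modify_add_one]
    simp [PySem.Dict.getD, PySem.Dict.get?, PySem.Dict.empty]
  simp only [hgetD]
  rw [sum_count_eq_countP _ (PySem.Set.nodup_ofList e) o]
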